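-- pv_equiv track=rewrite | github.com/iinteger/Codingtest | Programmers/level 2/할인 행사.py | solution
-- ===== SOURCE A (Python) =====
-- def solution(want, number, discount):
--     answer = 0
--
--     want_dict = {want[i]: number[i] for i in range(len(want))}
--
--     i = 0
--     while i + 10 <= len(discount):
--         want_dict_copy = want_dict.copy()
--         buy_all = True
--
--         for j in range(10):
--             if discount[i + j] in want_dict_copy:
--                 want_dict_copy[discount[i + j]] -= 1
--
--         # 물품을 다 샀는지 체크
--         for item in want_dict_copy.items():
--             # 물품 개수가 맞지 않은 경우
--             if item[1] != 0:
--                 buy_all = False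
--                 break
--
--         if buy_all:
--             answer += 1
--
--         i += 1
--     return answer
-- ===== SOURCE B (Python) =====
-- def solution(want, number, discount):
--     wd = dict(zip(want, number))
--     n = len(discount)
--     if n < 10:
--         return 0
--     # counts of wanted items in the current window discount[i-10:i]
--     cnt = {}
--     for x in discount[:10]:
--         if x in wd:
--             cnt[x] = cnt.get(x, 0) + 1
--     matched = 0
--     for k, v in wd.items():
--         if cnt.get(k, 0) == v:
--             matched += 1
--     ans = 1 if matched == len(wd) else 0
--     for i in range(10, n):
--         out = discount[i - 10]
--         if out in wd:
--             c = cnt.get(out, 0)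
--             if c == wd[out]:
--                 matched -= 1
--             cnt[out] = c - 1
--             if c - 1 == wd[out]:
--                 matched += 1
--         inc = discount[i]
--         if inc in wd:
--             c = cnt.get(inc, 0)
--             if c == wd[inc]:
--                 matched -= 1
--             cnt[inc] = c + 1
--             if c + 1 == wd[inc]:
--                 matched += 1
--         if matched == len(wd):
--             ans += 1
--     return ans
-- ===== Notes on version B (the rewrite author's own statement) =====
-- stated objective: faster
-- what changed: B replaces A's re-scan of every length-10 window (dict copy, 10 decrements, full all-zero scan per window) by a single sliding-window pass that maintains an incremental count map and an exact-match counter, updating both in O(1) per slide.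
import Mathlib
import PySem

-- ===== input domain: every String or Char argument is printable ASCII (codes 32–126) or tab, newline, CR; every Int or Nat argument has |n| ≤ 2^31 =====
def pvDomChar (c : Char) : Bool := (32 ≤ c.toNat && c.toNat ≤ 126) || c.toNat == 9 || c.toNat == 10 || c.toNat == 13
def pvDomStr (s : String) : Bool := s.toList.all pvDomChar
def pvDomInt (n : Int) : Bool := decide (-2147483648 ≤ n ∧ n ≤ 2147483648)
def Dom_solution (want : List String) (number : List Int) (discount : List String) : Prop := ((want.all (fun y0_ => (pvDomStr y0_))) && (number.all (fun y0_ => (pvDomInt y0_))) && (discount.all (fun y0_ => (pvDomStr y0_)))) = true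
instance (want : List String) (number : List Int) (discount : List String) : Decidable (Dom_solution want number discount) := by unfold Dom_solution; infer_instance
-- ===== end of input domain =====

-- B replaces A's recount-every-window scan by a single sliding-window pass with an incremental
-- count map and an exact-match counter (objective: faster, O(n + |want|) vs A's O(n·(10+|want|))).

-- ===== PORT A =====
def solution (want : List String) (number : List Int) (discount : List String) : Int :=
  -- want_dict = {want[i]: number[i] for i in range(len(want))}   (indices in range under Pre_, so pyGetD's defaults are never used)
  let wantDict : PySem.Dict String Int :=
    (PySem.List.pyRange 0 (want.length : Int)).foldl
      (fun d i => d.insert (PySem.List.pyGetD want i "") (PySem.List.pyGetD number i 0)) PySem.Dict.empty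
  -- while i + 10 <= len(discount): ...  i += 1   == for i in range(len(discount) - 10 + 1)
  (PySem.List.pyRange 0 ((discount.length : Int) - 10 + 1)).foldl
    (fun answer i =>
      -- copy = want_dict.copy(); for j in range(10): if discount[i+j] in copy: copy[discount[i+j]] -= 1
      let copy :=
        (PySem.List.pyRange 0 10).foldl
          (fun d j =>
            if d.contains (PySem.List.pyGetD discount (i + j) "")
            then d.modify (PySem.List.pyGetD discount (i + j) "") 0 (· - 1)
            else d) wantDict
      -- for item in copy.items(): if item[1] != 0: buy_all = False; break  (early break = List.all)
      if copy.items.all (fun p => p.2 == 0) then answer + 1 else answer)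
    0

-- ===== PORT B =====
-- B-side helper: _adjust(wd, cnt, matched, x, delta) — slide item x into/out of the window count,
-- returning the updated (cnt, matched) (Python mutates cnt in place and returns matched).
def bAdjust (wd : PySem.Dict String Int) (cnt : PySem.Dict String Int) (matched : Int)
    (x : String) (delta : Int) : PySem.Dict String Int × Int :=
  if wd.contains x then
    let c := cnt.getD x 0
    let matched := if c == wd.getD x 0 then matched - 1 else matched
    let cnt := cnt.insert x (c + delta)
    let matched := if c + delta == wd.getD x 0 then matched + 1 else matched
    (cnt, matched)
  else (cnt, matched)

-- B-side helper: the body of B's sliding loop 'for i in range(10, n)'.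
def bStep (wd : PySem.Dict String Int) (discount : List String)
    (st : PySem.Dict String Int × Int × Int) (i : Int) :
    PySem.Dict String Int × Int × Int :=
  let s1 := bAdjust wd st.1 st.2.1 (PySem.List.pyGetD discount (i - 10) "") (-1)
  let s2 := bAdjust wd s1.1 s1.2 (PySem.List.pyGetD discount i "") 1
  (s2.1, s2.2, if s2.2 == (wd.size : Int) then st.2.2 + 1 else st.2.2)

def solution_alt (want : List String) (number : List Int) (discount : List String) : Int :=
  let wd : PySem.Dict String Int :=
    (want.zip number).foldl (fun d p => d.insert p.1 p.2) PySem.Dict.empty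
  let n := discount.length
  if n < 10 then 0
  else
    -- cnt = counts of wanted items in discount[:10]
    let cnt : PySem.Dict String Int :=
      (PySem.List.slice discount none (some 10)).foldl
        (fun c x => if wd.contains x then c.insert x (c.getD x 0 + 1) else c) PySem.Dict.empty
    -- matched = sum(1 for k, v in wd.items() if cnt.get(k, 0) == v)
    let matched : Int :=
      wd.items.foldl (fun m p => if cnt.getD p.1 0 == p.2 then m + 1 else m) 0
    let ans : Int := if matched == (wd.size : Int) then 1 else 0
    ((PySem.List.pyRange 10 (n : Int)).foldl (bStep wd discount) (cnt, matched, ans)).2.2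

-- ===== PRECONDITION & SPEC =====
-- Pre_ excludes exactly the inputs where A raises IndexError: number shorter than want (the dict comprehension indexes number[i] for i < len(want)).
def Pre_solution (want : List String) (number : List Int) (discount : List String) : Prop :=
  want.length ≤ number.length
instance (want : List String) (number : List Int) (discount : List String) : Decidable (Pre_solution want number discount) := by unfold Pre_solution; infer_instance
def pvWitness_solution : List String × List Int × List String :=
  (["a"], [2], ["a", "a", "b", "a", "b", "a", "b", "b", "b", "b", "a"])

def Spec_solution (want : List String) (number : List Int) (discount : List String) (out : Int) : Prop := out = solution_alt want number discount
instance (want : List String) (number : List Int) (discount : List String) (out : Int) : Decidable (Spec_solution want number discount out) := by unfold Spec_solution; infer_instance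

-- ===== CLAIM (what is proved, stated in full; the proofs are below) =====
def Claim_equal_solution : Prop := ∀ (want : List String) (number : List Int) (discount : List String), Dom_solution want number discount → Pre_solution want number discount → Spec_solution want number discount (solution want number discount)

-- ===== LEMMAS AND PROOFS =====

-- A's index-comprehension dict equals B's zip-fold dict (under Pre_).
lemma build_prefix (want : List String) (number : List Int)
    (h : want.length ≤ number.length) (n : Nat) (hn : n ≤ want.length)
    (d : PySem.Dict String Int) :
    (List.range n).foldl
        (fun d (i : Nat) => d.insert (PySem.List.pyGetD want (i : Int) "") (PySem.List.pyGetD number (i : Int) 0)) d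
      = ((want.zip number).take n).foldl (fun d p => d.insert p.1 p.2) d := by
  induction n with
  | zero => simp
  | succ n ih =>
    have hw : n < want.length := by omega
    have hnum : n < number.length := by omega
    have hz : n < (want.zip number).length := by simp [List.length_zip]; omega
    rw [List.range_succ, List.foldl_append, ih (by omega)]
    rw [List.take_add_one, List.foldl_append]
    rw [List.getElem?_eq_getElem hz]
    simp only [List.foldl_cons, List.foldl_nil, Option.toList_some,
      PySem.List.pyGetD_natCast, List.getElem_zip]
    rw [List.getD_eq_getElem _ _ hw, List.getD_eq_getElem _ _ hnum]

lemma build_eq (want : List String) (number : List Int)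
    (h : want.length ≤ number.length) :
    (PySem.List.pyRange 0 (want.length : Int)).foldl
        (fun d i => d.insert (PySem.List.pyGetD want i "") (PySem.List.pyGetD number i 0)) PySem.Dict.empty
      = (want.zip number).foldl (fun d p => d.insert p.1 p.2) PySem.Dict.empty := by
  rw [PySem.List.pyRange_zero_nat, List.foldl_map]
  rw [build_prefix want number h want.length le_rfl]
  congr 1
  exact List.take_of_length_le (by simp [List.length_zip])

-- A's inner j-loop over discount[i+j] is a fold over the window list.
lemma window_fold (xs : List String) (i : Int) (k : Nat) (hi : 0 ≤ i)
    (hk : i.toNat + k ≤ xs.length)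
    (g : PySem.Dict String Int → String → PySem.Dict String Int) (d0 : PySem.Dict String Int) :
    (PySem.List.pyRange 0 (k : Int)).foldl (fun d j => g d (PySem.List.pyGetD xs (i + j) "")) d0
      = ((xs.drop i.toNat).take k).foldl g d0 := by
  rw [PySem.List.pyRange_zero_nat, List.foldl_map]
  induction k with
  | zero => simp
  | succ k ih =>
    rw [List.range_succ, List.foldl_append, ih (by omega)]
    have hlt : i.toNat + k < xs.length := by omega
    have hcast : i + (k : Int) = ((i.toNat + k : Nat) : Int) := by omega
    rw [List.take_add_one, List.foldl_append]
    have hget : (xs.drop i.toNat)[k]? = some (xs.getD (i.toNat + k) "") := by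
      rw [List.getElem?_drop]
      rw [List.getElem?_eq_getElem hlt]
      rw [List.getD_eq_getElem _ _ hlt]
    rw [hget]
    simp only [List.foldl_cons, List.foldl_nil, Option.toList_some]
    rw [hcast, PySem.List.pyGetD_natCast]

-- A's decrement loop: keys are preserved and each wanted key's value drops by its window count.
lemma stepfold_keys (xs : List String) (d : PySem.Dict String Int) :
    (xs.foldl (fun d x => if d.contains x then d.modify x 0 (· - 1) else d) d).keys = d.keys := by
  induction xs generalizing d with
  | nil => rfl
  | cons x xs ih =>
    simp only [List.foldl_cons]
    rw [ih]
    by_cases hx : d.contains x = true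
    · simp only [hx, if_true, PySem.Dict.keys_modify]
      rw [PySem.Dict.keys_insert_of_contains]
      · exact hx
    · simp [hx]

lemma stepfold_getD (xs : List String) (d : PySem.Dict String Int) (k : String)
    (h : d.contains k = true) :
    (xs.foldl (fun d x => if d.contains x then d.modify x 0 (· - 1) else d) d).getD k 0
      = d.getD k 0 - xs.count k := by
  induction xs generalizing d with
  | nil => simp
  | cons x xs ih =>
    simp only [List.foldl_cons]
    by_cases hx : d.contains x = true
    · rw [if_pos hx]
      have h' : (d.modify x 0 (· - 1)).contains k = true := by
        rw [PySem.Dict.contains_modify]; simp [h]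
      rw [ih _ h', PySem.Dict.getD_modify]
      by_cases hk : k = x
      · subst hk
        simp
        ring
      · rw [if_neg hk]
        have : x ≠ k := Ne.symm hk
        simp [this]
    · rw [if_neg hx]
      rw [ih _ h]
      have hkx : x ≠ k := fun e => hx (e ▸ h)
      simp [hkx]

-- per-window: A's all-zero scan of the decremented copy equals the count comparison.
lemma check_eq (xs : List String) (d : PySem.Dict String Int) (hnd : d.keys.Nodup) :
    ((xs.foldl (fun d x => if d.contains x then d.modify x 0 (· - 1) else d) d).items.all
        (fun p => p.2 == 0))
      = d.items.all (fun p => ((xs.count p.1 : Int)) == p.2) := by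
  have hk := stepfold_keys xs d
  rw [PySem.Dict.items_eq_map_keys _ (hk ▸ hnd) 0, PySem.Dict.items_eq_map_keys _ hnd 0, hk]
  rw [List.all_map, List.all_map]
  rw [Bool.eq_iff_iff, List.all_eq_true, List.all_eq_true]
  constructor
  · intro H k hkmem
    have hc : d.contains k = true := (PySem.Dict.contains_iff_mem_keys d k).mpr hkmem
    have := H k hkmem
    simp only [Function.comp, stepfold_getD xs d k hc, beq_iff_eq] at this ⊢
    omega
  · intro H k hkmem
    have hc : d.contains k = true := (PySem.Dict.contains_iff_mem_keys d k).mpr hkmem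
    have := H k hkmem
    simp only [Function.comp, stepfold_getD xs d k hc, beq_iff_eq] at this ⊢
    omega

-- ---- B-side machinery: the sliding-window invariant ----

-- window s matches iff every wanted item occurs exactly its required number of times in discount[s:s+10]
def winOK (wd : PySem.Dict String Int) (xs : List String) (s : Nat) : Bool :=
  wd.items.all (fun p => (((xs.drop s).take 10).count p.1 : Int) == p.2)

-- B's loop invariant: cnt holds the window counts of wanted keys, matched counts the exactly-met wants.
def BInv (wd cnt : PySem.Dict String Int) (matched : Int) (c : String → Int) : Prop :=
  (∀ k, cnt.getD k 0 = if wd.contains k then c k else 0) ∧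
  matched = (List.countP (fun p => c p.1 == p.2) wd.items : Int)

-- changing the count function at a single key x (with (x, w) a pair of the nodup-key item list)
-- changes the matched count by exactly the indicator difference at x
lemma countP_change_at (c c' : String → Int) (x : String) (w : Int) (l : List (String × Int))
    (hnd : (l.map Prod.fst).Nodup) (hmem : (x, w) ∈ l)
    (hagr : ∀ k, k ≠ x → c' k = c k) :
    (List.countP (fun p => c' p.1 == p.2) l : Int)
      = (List.countP (fun p => c p.1 == p.2) l : Int)
        - (if c x == w then 1 else 0) + (if c' x == w then 1 else 0) := by
  induction l with
  | nil => simp at hmem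
  | cons p t ih =>
    simp only [List.map_cons, List.nodup_cons] at hnd
    obtain ⟨hpx, hndt⟩ := hnd
    rw [List.countP_cons, List.countP_cons]
    rcases List.mem_cons.mp hmem with heq | hmemt
    · subst heq
      have ht : ∀ q ∈ t, q.1 ≠ x := by
        intro q hq e
        have hmm : q.1 ∈ t.map Prod.fst := List.mem_map_of_mem hq
        rw [e] at hmm
        exact hpx hmm
      have hct : List.countP (fun p => c' p.1 == p.2) t = List.countP (fun p => c p.1 == p.2) t :=
        List.countP_congr (fun q hq => by simp [hagr q.1 (ht q hq)])
      rw [hct]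
      push_cast
      split_ifs <;> simp_all <;> omega
    · have hp1 : p.1 ≠ x := by
        intro e
        exact hpx (e ▸ List.mem_map_of_mem hmemt)
      have hpred : (c' p.1 == p.2) = (c p.1 == p.2) := by rw [hagr p.1 hp1]
      rw [hpred]
      have := ih hndt hmemt
      push_cast at this ⊢
      split_ifs at this ⊢ <;> omega

-- bAdjust preserves the invariant, for the count function bumped by delta at x
lemma bAdjust_inv (wd cnt : PySem.Dict String Int) (matched : Int) (c : String → Int)
    (x : String) (delta : Int) (hnd : wd.keys.Nodup) (h : BInv wd cnt matched c) :
    BInv wd (bAdjust wd cnt matched x delta).1 (bAdjust wd cnt matched x delta).2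
      (fun k => if k = x then c k + delta else c k) := by
  obtain ⟨hc, hm⟩ := h
  unfold bAdjust
  by_cases hx : wd.contains x = true
  · have hcx : cnt.getD x 0 = c x := by rw [hc x, if_pos hx]
    simp only [hx, if_true]
    constructor
    · intro k
      rw [PySem.Dict.getD_insert]
      by_cases hkx : k = x
      · subst hkx; simp [hx, hcx]
      · rw [if_neg hkx, hc k]; simp [hkx]
    · have hxk : x ∈ wd.keys := (PySem.Dict.contains_iff_mem_keys wd x).mp hx
      have hmem : (x, wd.getD x 0) ∈ wd.items := by
        rw [PySem.Dict.items_eq_map_keys wd hnd 0]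
        exact List.mem_map_of_mem hxk
      have hndi : (wd.items.map Prod.fst).Nodup := by
        have : wd.items.map Prod.fst = wd.keys := rfl
        rw [this]; exact hnd
      have hch := countP_change_at c (fun k => if k = x then c k + delta else c k) x
        (wd.getD x 0) wd.items hndi hmem (fun k hk => by simp [hk])
      simp only [if_pos rfl] at hch
      rw [hch, ← hm, hcx]
      split_ifs <;> omega
  · have hx' : wd.contains x = false := by simpa using hx
    simp only [hx', Bool.false_eq_true, if_false]
    constructor
    · intro k
      rw [hc k]
      by_cases hkx : k = x
      · subst hkx; simp [hx']
      · simp [hkx]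
    · rw [hm]
      congr 1
      apply List.countP_congr
      intro q hq
      have hqk : q.1 ∈ wd.keys := PySem.Dict.mem_keys_of_mem_items wd hq
      have hqx : q.1 ≠ x := by
        intro e
        rw [← e] at hx'
        rw [(PySem.Dict.contains_iff_mem_keys wd q.1).mpr hqk] at hx'
        simp at hx'
      simp [hqx]

-- sliding the window one step changes each key's count by the out/in indicator difference
lemma wcount_step (xs : List String) (s : Nat) (h : s + 10 < xs.length) (k : String) :
    ((((xs.drop (s+1)).take 10).count k : Int))
      = (((xs.drop s).take 10).count k : Int)
        - (if k = xs.getD s "" then 1 else 0) + (if k = xs.getD (s+10) "" then 1 else 0) := by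
  have hs : s < xs.length := by omega
  have hget : (xs.drop (s+1))[9]? = some (xs.getD (s+10) "") := by
    rw [List.getElem?_drop, List.getD_eq_getElem _ _ (by omega : s + 10 < xs.length),
      List.getElem?_eq_getElem (by omega : s + 1 + 9 < xs.length)]
  have h2 : (xs.drop (s+1)).take 10 = (xs.drop (s+1)).take 9 ++ [xs.getD (s+10) ""] := by
    conv_lhs => rw [show (10 : Nat) = 9 + 1 from rfl, List.take_add_one]
    rw [hget]
    rfl
  have h3 : (xs.drop s).take 10 = xs.getD s "" :: (xs.drop (s+1)).take 9 := by
    rw [List.drop_eq_getElem_cons hs, List.getD_eq_getElem _ _ hs]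
    rfl
  rw [h2, h3]
  simp only [List.count_append, List.count_cons, List.count_nil, beq_iff_eq]
  push_cast
  by_cases e1 : k = xs.getD s "" <;> by_cases e2 : k = xs.getD (s+10) "" <;>
    simp [e1, e2, eq_comm] <;> omega

-- matched == len(wd) exactly when every wanted item is matched
lemma matched_beq_size (wd : PySem.Dict String Int) (c : String → Int) :
    (((List.countP (fun p => c p.1 == p.2) wd.items : Nat) : Int) == (wd.size : Int))
      = wd.items.all (fun p => c p.1 == p.2) := by
  have hsz : wd.size = wd.items.length := rfl
  rw [Bool.eq_iff_iff, beq_iff_eq, List.all_eq_true]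
  constructor
  · intro h
    exact List.countP_eq_length.mp (by rw [hsz] at h; exact_mod_cast h)
  · intro h
    rw [List.countP_eq_length.mpr h, hsz]

-- the initial count loop computes the wanted-key counts of its input list
lemma init_cnt (wd : PySem.Dict String Int) (xs : List String) (k : String) :
    ∀ cnt : PySem.Dict String Int,
      ((xs.foldl (fun c x => if wd.contains x then c.insert x (c.getD x 0 + 1) else c) cnt).getD k 0)
        = cnt.getD k 0 + (if wd.contains k then (xs.count k : Int) else 0) := by
  induction xs with
  | nil => intro cnt; simp
  | cons x t ih =>
    intro cnt
    simp only [List.foldl_cons]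
    by_cases hx : wd.contains x = true
    · rw [if_pos hx, ih]
      rw [PySem.Dict.getD_insert]
      by_cases hkx : k = x
      · subst hkx
        rw [if_pos rfl, if_pos hx, if_pos hx, List.count_cons_self]
        push_cast; ring
      · rw [if_neg hkx, List.count_cons_of_ne (fun e => hkx e.symm)]
    · rw [if_neg hx, ih]
      by_cases hkx : k = x
      · subst hkx
        simp [hx]
      · rw [List.count_cons_of_ne (fun e => hkx e.symm)]

-- one loop iteration: state stays invariant for the slid window, ans is bumped iff the new window matches
lemma bStep_char (wd : PySem.Dict String Int) (xs : List String) (hnd : wd.keys.Nodup)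
    (s : Nat) (hs : s + 10 < xs.length) (cnt : PySem.Dict String Int) (matched ans : Int)
    (h : BInv wd cnt matched (fun k => (((xs.drop s).take 10).count k : Int))) :
    ∃ cnt' matched',
      bStep wd xs (cnt, matched, ans) (10 + (s : Int))
        = (cnt', matched', if winOK wd xs (s+1) then ans + 1 else ans)
      ∧ BInv wd cnt' matched' (fun k => (((xs.drop (s+1)).take 10).count k : Int)) := by
  have hout : (10 : Int) + (s : Int) - 10 = ((s : Nat) : Int) := by omega
  have hinc : (10 : Int) + (s : Int) = (((10 + s : Nat)) : Int) := by omega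
  have h1 := bAdjust_inv wd cnt matched _ (xs.getD s "") (-1) hnd h
  have h2 := bAdjust_inv wd _ _ _ (xs.getD (10 + s) "") 1 hnd h1
  have hfun : (fun k => if k = xs.getD (10 + s) ""
        then (if k = xs.getD s "" then (((xs.drop s).take 10).count k : Int) + (-1)
              else (((xs.drop s).take 10).count k : Int)) + 1
        else (if k = xs.getD s "" then (((xs.drop s).take 10).count k : Int) + (-1)
              else (((xs.drop s).take 10).count k : Int)))
      = (fun k => (((xs.drop (s+1)).take 10).count k : Int)) := by
    funext k
    have hw := wcount_step xs s hs k
    have hsw : xs.getD (s + 10) "" = xs.getD (10 + s) "" := by rw [Nat.add_comm]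
    rw [hsw] at hw
    rw [hw]
    split_ifs <;> omega
  rw [hfun] at h2
  refine ⟨(bAdjust wd (bAdjust wd cnt matched (xs.getD s "") (-1)).1
      (bAdjust wd cnt matched (xs.getD s "") (-1)).2 (xs.getD (10 + s) "") 1).1,
    (bAdjust wd (bAdjust wd cnt matched (xs.getD s "") (-1)).1
      (bAdjust wd cnt matched (xs.getD s "") (-1)).2 (xs.getD (10 + s) "") 1).2, ?_, h2⟩
  have hcond : ((bAdjust wd (bAdjust wd cnt matched (xs.getD s "") (-1)).1
      (bAdjust wd cnt matched (xs.getD s "") (-1)).2 (xs.getD (10 + s) "") 1).2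
        == (wd.size : Int)) = winOK wd xs (s+1) := by
    rw [h2.2, matched_beq_size wd (fun k => (((xs.drop (s+1)).take 10).count k : Int))]
    rfl
  have e1 : PySem.List.pyGetD xs (10 + (s : Int) - 10) "" = xs.getD s "" := by
    rw [hout, PySem.List.pyGetD_natCast]
  have e2 : PySem.List.pyGetD xs (10 + (s : Int)) "" = xs.getD (10 + s) "" := by
    rw [hinc, PySem.List.pyGetD_natCast]
  simp only [bStep, e1, e2, hcond]

-- running the loop for m slides from the window-0 state counts the matching windows 1..m
lemma loop_inv (wd : PySem.Dict String Int) (xs : List String) (hnd : wd.keys.Nodup)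
    (m : Nat) (hm : 10 + m ≤ xs.length) (cnt0 : PySem.Dict String Int) (matched0 ans0 : Int)
    (h0 : BInv wd cnt0 matched0 (fun k => ((xs.take 10).count k : Int))) :
    ∃ cnt matched,
      (PySem.List.pyRange 10 (10 + (m : Int))).foldl (bStep wd xs) (cnt0, matched0, ans0)
        = (cnt, matched,
            ans0 + (List.countP (fun j => winOK wd xs (j+1)) (List.range m) : Int))
      ∧ BInv wd cnt matched (fun k => (((xs.drop m).take 10).count k : Int)) := by
  induction m with
  | zero =>
    refine ⟨cnt0, matched0, ?_, by simpa using h0⟩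
    rw [show ((10 : Int) + ((0 : Nat) : Int)) = 10 from by simp,
      PySem.List.pyRange_one_eq_nil le_rfl]
    simp
  | succ m ih =>
    obtain ⟨cnt, matched, heq, hinv⟩ := ih (by omega)
    have hdec : PySem.List.pyRange 10 (10 + ((m + 1 : Nat) : Int))
        = PySem.List.pyRange 10 (10 + (m : Int)) ++ [10 + (m : Int)] := by
      rw [show (10 + ((m + 1 : Nat) : Int)) = (10 + (m : Int)) + 1 from by push_cast; ring]
      exact PySem.List.pyRange_one_succ_right (by omega)
    rw [hdec, List.foldl_append, heq]
    obtain ⟨cnt', matched', hstep, hinv'⟩ := bStep_char wd xs hnd m (by omega) cnt matched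
      (ans0 + (List.countP (fun j => winOK wd xs (j+1)) (List.range m) : Int)) hinv
    refine ⟨cnt', matched', ?_, hinv'⟩
    simp only [List.foldl_cons, List.foldl_nil, hstep]
    rw [List.range_succ, List.countP_append, List.countP_cons, List.countP_nil]
    push_cast
    split_ifs with hW <;> simp [hW] <;> ring

-- ===== VERDICT (by name: the statement is the Claim_ definition above) =====
theorem solution_spec : Claim_equal_solution := by
  intro want number discount _ hpre
  unfold Spec_solution
  unfold Pre_solution at hpre
  simp only [solution, solution_alt]
  rw [build_eq want number hpre]
  set wd := (want.zip number).foldl (fun d p => d.insert p.1 p.2) PySem.Dict.empty with hwd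
  have hnd : wd.keys.Nodup :=
    PySem.Dict.nodup_keys_foldl_insert_key (want.zip number) Prod.fst (fun _ x => x.2)
      PySem.Dict.empty PySem.Dict.nodup_keys_empty
  -- A = countP of the per-window predicate over the window starts
  rw [PySem.List.foldl_count_if]
  by_cases h10 : discount.length < 10
  · -- fewer than 10 items: no window, both 0
    rw [if_pos h10]
    have hnil : PySem.List.pyRange 0 ((discount.length : Int) - 10 + 1) = [] :=
      PySem.List.pyRange_one_eq_nil (by omega)
    rw [hnil]
    simp
  · push_neg at h10
    rw [if_neg (by omega)]
    set n := discount.length with hn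
    set m := n - 10 with hmdef
    -- A-side: predicate over window start i rewrites to winOK
    have hArange : (discount.length : Int) - 10 + 1 = ((m + 1 : Nat) : Int) := by
      rw [← hn]; omega
    rw [hArange, PySem.List.pyRange_zero_nat, List.countP_map]
    have hAcount : ∀ j ∈ List.range (m + 1),
        ((fun i => ((PySem.List.pyRange 0 10).foldl
          (fun d k =>
            if d.contains (PySem.List.pyGetD discount (i + k) "")
            then d.modify (PySem.List.pyGetD discount (i + k) "") 0 (· - 1)
            else d) wd).items.all (fun p => p.2 == 0)) ∘ (fun k : Nat => (k : Int))) j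
          = winOK wd discount j := by
      intro j hj
      have hjm : j + 10 ≤ n := by
        have := List.mem_range.mp hj
        omega
      simp only [Function.comp]
      have hw := window_fold discount (j : Int) 10 (by positivity) (by simpa using hjm)
        (fun d x => if d.contains x then d.modify x 0 (· - 1) else d) wd
      rw [show ((10 : Nat) : Int) = (10 : Int) from rfl] at hw
      rw [hw, check_eq _ _ hnd]
      simp only [winOK, Int.toNat_natCast]
    rw [List.countP_congr (fun j hj => by rw [hAcount j hj])]
    -- B-side: initial state satisfies the invariant for window 0
    have hslice : PySem.List.slice discount none (some 10) = discount.take 10 :=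
      PySem.List.slice_to discount (by norm_num)
    rw [hslice]
    set cnt0 : PySem.Dict String Int := (discount.take 10).foldl
      (fun c x => if wd.contains x then c.insert x (c.getD x 0 + 1) else c) PySem.Dict.empty
      with hcnt0
    have hc0 : ∀ k, cnt0.getD k 0 = if wd.contains k
        then (((discount.take 10).count k : Nat) : Int) else 0 := by
      intro k
      rw [hcnt0, init_cnt]
      simp
    have hm0 : (wd.items.foldl (fun m p => if cnt0.getD p.1 0 == p.2 then m + 1 else m) (0 : Int))
        = (List.countP (fun p => (((discount.take 10).count p.1 : Nat) : Int) == p.2) wd.items : Int) := by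
      rw [PySem.List.foldl_count_if]
      rw [List.countP_congr (q := fun p => (((discount.take 10).count p.1 : Nat) : Int) == p.2)]
      · ring
      · intro q hq
        have hqk : q.1 ∈ wd.keys := PySem.Dict.mem_keys_of_mem_items wd hq
        have hcq : wd.contains q.1 = true := (PySem.Dict.contains_iff_mem_keys wd q.1).mpr hqk
        rw [hc0 q.1, if_pos hcq]
    have hinv0 : BInv wd cnt0
        (wd.items.foldl (fun m p => if cnt0.getD p.1 0 == p.2 then m + 1 else m) (0 : Int))
        (fun k => (((discount.take 10).count k : Nat) : Int)) :=
      ⟨hc0, hm0⟩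
    have hnint : (n : Int) = 10 + (m : Int) := by omega
    rw [hnint]
    obtain ⟨cnt, matched, heq, _⟩ := loop_inv wd discount hnd m (by omega) cnt0 _
      (if (wd.items.foldl (fun m p => if cnt0.getD p.1 0 == p.2 then m + 1 else m) (0 : Int))
          == (wd.size : Int) then 1 else 0) hinv0
    rw [heq]
    have hans0 : (if (wd.items.foldl (fun m p => if cnt0.getD p.1 0 == p.2 then m + 1 else m) (0 : Int))
        == (wd.size : Int) then (1 : Int) else 0)
        = if winOK wd discount 0 then 1 else 0 := by
      rw [hm0, matched_beq_size wd (fun k => (((discount.take 10).count k : Nat) : Int))]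
      simp [winOK]
    rw [hans0]
    -- count over range (m+1) splits as window 0 plus windows j+1 for j < m
    have hcp : List.countP (winOK wd discount ∘ Nat.succ) (List.range m)
        = List.countP (fun j => winOK wd discount (j+1)) (List.range m) :=
      List.countP_congr (fun j _ => by simp [Function.comp, Nat.succ_eq_add_one])
    rw [List.range_succ_eq_map, List.countP_cons, List.countP_map, hcp]
    push_cast
    split_ifs with hW <;> omega
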